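-- pv_equiv track=rewrite | github.com/sdr-classroom/lab1-solution | test.py | get_total_per_user
-- ===== SOURCE A (Python) =====
-- def get_users_from_graph(graph):
--     users = set()
--     for username, other_users in graph.items():
--         users.add(username)
--         for other_user in other_users.keys():
--             users.add(other_user)
--     # Sorted alphabetically
--     users = list(users)
--     users.sort()
--     return users
--
-- def get_total_per_user(graph):
--     totals = {}
--     for username in get_users_from_graph(graph):
--         totals[username] = 0
--     for username, other_users in graph.items():
--         for other_user, amount in other_users.items():
--             totals[username] += amount
--             totals[other_user] -= amount
--     return totals
-- ===== SOURCE B (Python) =====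
-- def get_total_per_user(graph):
--     edges = [(u, v, a) for u, nbrs in graph.items() for v, a in nbrs.items()]
--     users = sorted(set(graph) | {v for _, v, _ in edges})
--     return {u: sum(a for s, _, a in edges if s == u)
--                - sum(a for _, t, a in edges if t == u)
--             for u in users}
-- ===== Notes on version B (the rewrite author's own statement) =====
-- stated objective: alternative
-- what changed: B replaces A's init-a-zeroed-dict-then-imperatively-accumulate shape with a purely functional one: it flattens the graph into an explicit (source, target, amount) edge list, and computes each user's balance independently as (sum of outgoing amounts) - (sum of incoming amounts) by comprehension sums over that edge list, iterating the sorted user set; no mutable totals dict exists.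
import Mathlib
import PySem

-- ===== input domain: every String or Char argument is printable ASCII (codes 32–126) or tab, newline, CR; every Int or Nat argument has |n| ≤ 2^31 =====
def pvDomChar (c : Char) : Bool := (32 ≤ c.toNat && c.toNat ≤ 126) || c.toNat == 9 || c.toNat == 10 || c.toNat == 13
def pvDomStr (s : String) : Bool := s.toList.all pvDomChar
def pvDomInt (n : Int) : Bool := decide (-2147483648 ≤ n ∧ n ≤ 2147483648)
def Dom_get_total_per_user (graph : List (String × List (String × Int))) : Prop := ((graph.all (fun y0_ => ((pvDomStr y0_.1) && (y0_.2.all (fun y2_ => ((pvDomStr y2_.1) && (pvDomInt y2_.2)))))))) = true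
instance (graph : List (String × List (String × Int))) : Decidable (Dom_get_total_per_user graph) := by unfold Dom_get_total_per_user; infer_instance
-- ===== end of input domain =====

-- B flattens the graph into an explicit edge list and computes each user's balance
-- independently as outgoing-sum minus incoming-sum over that list (no mutable totals dict),
-- instead of A's zero-initialized dict accumulated imperatively (objective: alternative).

-- ===== PORT A =====
def get_users_from_graph (graph : List (String × List (String × Int))) : List String :=
  let users : PySem.Set String :=
    graph.foldl (fun users p =>
      p.2.foldl (fun us q => PySem.Set.add us q.1) (PySem.Set.add users p.1)) PySem.Set.empty
  PySem.List.sorted users (fun x => x) false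

-- `totals[username] += amount` is ported as `modify … 0 (· + amount)`: the key is always present
-- (every touched name was zero-initialized), so the default 0 is never consulted where Python
-- would raise KeyError.
def get_total_per_user (graph : List (String × List (String × Int))) : List (String × Int) :=
  let totals0 : PySem.Dict String Int :=
    (get_users_from_graph graph).foldl (fun t u => t.insert u 0) PySem.Dict.empty
  let totals :=
    graph.foldl (fun t p =>
      p.2.foldl (fun t q => (t.modify p.1 0 (· + q.2)).modify q.1 0 (· - q.2)) t) totals0
  totals.items

-- ===== PORT B =====
def get_total_per_user_alt (graph : List (String × List (String × Int))) : List (String × Int) :=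
  let edges : List (String × String × Int) :=
    graph.flatMap (fun p => p.2.map (fun q => (p.1, q.1, q.2)))
  let users : List String :=
    PySem.List.sorted
      (PySem.Set.union (PySem.Set.ofList (graph.map (·.1)))
        (PySem.Set.ofList (edges.map (fun e => e.2.1)))) (fun x => x) false
  users.map (fun u =>
    (u, ((edges.filter (fun e => e.1 == u)).map (fun e => e.2.2)).sum
      - ((edges.filter (fun e => e.2.1 == u)).map (fun e => e.2.2)).sum))

-- ===== PRECONDITION & SPEC =====
def Spec_get_total_per_user (graph : List (String × List (String × Int))) (out : List (String × Int)) : Prop := out = get_total_per_user_alt graph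
instance (graph : List (String × List (String × Int))) (out : List (String × Int)) : Decidable (Spec_get_total_per_user graph out) := by unfold Spec_get_total_per_user; infer_instance

-- ===== CLAIM (what is proved, stated in full; the proofs are below) =====
def Claim_equal_get_total_per_user : Prop := ∀ (graph : List (String × List (String × Int))), Dom_get_total_per_user graph → Spec_get_total_per_user graph (get_total_per_user graph)

-- ===== LEMMAS AND PROOFS =====

-- the net balance of user v: what v lends minus what is lent to v
def pvContrib (v : String) (p : String × List (String × Int)) : Int :=
  (p.2.map (fun q => (if p.1 = v then q.2 else 0) + (if q.1 = v then -q.2 else 0))).sum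

def pvNet (v : String) (graph : List (String × List (String × Int))) : Int :=
  (graph.map (pvContrib v)).sum

-- every username occurring in the graph (with multiplicity, in occurrence order)
def pvNames (graph : List (String × List (String × Int))) : List String :=
  graph.flatMap (fun p => p.1 :: p.2.map (·.1))

-- ---- A-side value lemmas ----

theorem pvA_step_getD (t : PySem.Dict String Int) (u o : String) (a : Int) (v : String) :
    ((t.modify u 0 (· + a)).modify o 0 (· - a)).getD v 0
      = t.getD v 0 + ((if u = v then a else 0) + (if o = v then -a else 0)) := by
  simp only [PySem.Dict.getD_modify]
  rcases eq_or_ne v o with rfl | ho <;> rcases eq_or_ne v u with rfl | hu <;>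
    (simp_all [eq_comm]; try ring)

theorem pvA_inner_getD (u : String) (os : List (String × Int)) (t : PySem.Dict String Int) (v : String) :
    (os.foldl (fun t q => (t.modify u 0 (· + q.2)).modify q.1 0 (· - q.2)) t).getD v 0
      = t.getD v 0 + (os.map (fun q => (if u = v then q.2 else 0) + (if q.1 = v then -q.2 else 0))).sum := by
  induction os generalizing t with
  | nil => simp
  | cons q os ih =>
      rw [List.foldl_cons, List.map_cons, List.sum_cons, ih, pvA_step_getD]
      ring

theorem pvA_getD (graph : List (String × List (String × Int))) (t : PySem.Dict String Int) (v : String) :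
    (graph.foldl (fun t p =>
        p.2.foldl (fun t q => (t.modify p.1 0 (· + q.2)).modify q.1 0 (· - q.2)) t) t).getD v 0
      = t.getD v 0 + pvNet v graph := by
  induction graph generalizing t with
  | nil => simp [pvNet]
  | cons p graph ih =>
      simp only [List.foldl_cons, ih, pvA_inner_getD, pvNet, pvContrib, List.map_cons, List.sum_cons]
      ring

-- ---- A-side key-set lemmas ----

theorem pvNames_cons (p : String × List (String × Int)) (graph : List (String × List (String × Int))) :
    pvNames (p :: graph) = (p.1 :: p.2.map (·.1)) ++ pvNames graph := by
  simp [pvNames]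

theorem pvUsers_inner_mem (os : List (String × Int)) (s : PySem.Set String) (v : String) :
    v ∈ os.foldl (fun us q => PySem.Set.add us q.1) s ↔ v ∈ s ∨ v ∈ os.map (·.1) := by
  induction os generalizing s with
  | nil => simp
  | cons q os ih => simp [ih, PySem.Set.mem_add]; tauto

theorem pvUsers_mem (graph : List (String × List (String × Int))) (s : PySem.Set String) (v : String) :
    v ∈ graph.foldl (fun users p =>
        p.2.foldl (fun us q => PySem.Set.add us q.1) (PySem.Set.add users p.1)) s
      ↔ v ∈ s ∨ v ∈ pvNames graph := by
  induction graph generalizing s with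
  | nil => simp [pvNames]
  | cons p graph ih =>
      rw [List.foldl_cons, ih, pvUsers_inner_mem, PySem.Set.mem_add, pvNames_cons]
      simp only [List.mem_append, List.mem_cons]
      tauto

theorem pvUsers_inner_nodup (os : List (String × Int)) (s : PySem.Set String) (h : s.Nodup) :
    (os.foldl (fun us q => PySem.Set.add us q.1) s).Nodup := by
  induction os generalizing s with
  | nil => exact h
  | cons q os ih => exact ih _ (PySem.Set.nodup_add _ _ h)

theorem pvUsers_nodup (graph : List (String × List (String × Int))) (s : PySem.Set String) (h : s.Nodup) :
    (graph.foldl (fun users p =>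
        p.2.foldl (fun us q => PySem.Set.add us q.1) (PySem.Set.add users p.1)) s).Nodup := by
  induction graph generalizing s with
  | nil => exact h
  | cons p graph ih => exact ih _ (pvUsers_inner_nodup _ _ (PySem.Set.nodup_add _ _ h))

theorem pvUsersList_nodup (graph : List (String × List (String × Int))) :
    (get_users_from_graph graph).Nodup := by
  unfold get_users_from_graph
  exact (PySem.List.sorted_perm _ _ _).nodup_iff.mpr (pvUsers_nodup graph _ (by simp [PySem.Set.empty]))

theorem pvUsersList_mem (graph : List (String × List (String × Int))) (v : String) :
    v ∈ get_users_from_graph graph ↔ v ∈ pvNames graph := by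
  unfold get_users_from_graph
  rw [(PySem.List.sorted_perm _ _ _).mem_iff, pvUsers_mem]
  simp [PySem.Set.empty]

-- zero-init: keys are exactly the user list, every default-0 lookup is 0
theorem pvInit_getD (l : List String) (t : PySem.Dict String Int) (v : String)
    (h : t.getD v 0 = 0) : (l.foldl (fun t u => t.insert u 0) t).getD v 0 = 0 := by
  induction l generalizing t with
  | nil => exact h
  | cons u l ih =>
      refine ih _ ?_
      rw [PySem.Dict.getD_insert]; split_ifs <;> simp [h]

theorem pvFoldl_add_eq_append (l : List String) (s : PySem.Set String)
    (h : (s ++ l).Nodup) : l.foldl PySem.Set.add s = s ++ l := by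
  induction l generalizing s with
  | nil => simp
  | cons x l ih =>
      have hx : x ∉ s := by
        intro hm
        exact (List.disjoint_of_nodup_append h) hm (by simp)
      have : PySem.Set.add s x = s ++ [x] := by
        simp only [PySem.Set.add]
        rw [if_neg (by simpa [List.contains_iff_mem] using hx)]
      rw [List.foldl_cons, this, ih]
      · simp
      · simpa using h

theorem pvInit_keys (l : List String) (h : l.Nodup) :
    (l.foldl (fun t u => t.insert u 0) (PySem.Dict.empty : PySem.Dict String Int)).keys = l := by
  rw [PySem.Dict.keys_foldl_insert_key l (fun x => x) (fun _ _ => (0 : Int))]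
  simp only [PySem.Dict.keys_empty, List.map_id']
  have := pvFoldl_add_eq_append l [] (by simpa using h)
  simpa [PySem.Set.update] using this

-- A's accumulation loop never adds a key: every touched name is already present
theorem pvA_inner_keys (u : String) (os : List (String × Int)) (t : PySem.Dict String Int)
    (hu : u ∈ t.keys) (hos : ∀ q ∈ os, q.1 ∈ t.keys) :
    (os.foldl (fun t q => (t.modify u 0 (· + q.2)).modify q.1 0 (· - q.2)) t).keys = t.keys := by
  induction os generalizing t with
  | nil => rfl
  | cons q os ih =>
      have h1 : ((t.modify u 0 (· + q.2)).modify q.1 0 (· - q.2)).keys = t.keys := by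
        rw [PySem.Dict.keys_modify, PySem.Dict.keys_insert_of_contains, PySem.Dict.keys_modify,
          PySem.Dict.keys_insert_of_contains]
        · exact (PySem.Dict.contains_iff_mem_keys _ _).mpr hu
        · rw [PySem.Dict.contains_iff_mem_keys, PySem.Dict.keys_modify,
            PySem.Dict.keys_insert_of_contains _ _ ((PySem.Dict.contains_iff_mem_keys _ _).mpr hu)]
          exact hos q (by simp)
      rw [List.foldl_cons, ih _ (h1 ▸ hu) (fun r hr => h1 ▸ hos r (by simp [hr]))]
      exact h1

theorem pvA_keys (graph : List (String × List (String × Int))) (t : PySem.Dict String Int)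
    (h : ∀ v ∈ pvNames graph, v ∈ t.keys) :
    (graph.foldl (fun t p =>
        p.2.foldl (fun t q => (t.modify p.1 0 (· + q.2)).modify q.1 0 (· - q.2)) t) t).keys = t.keys := by
  induction graph generalizing t with
  | nil => rfl
  | cons p graph ih =>
      have hu : p.1 ∈ t.keys := h p.1 (by rw [pvNames_cons]; simp)
      have hos : ∀ q ∈ p.2, q.1 ∈ t.keys := fun q hq =>
        h q.1 (by rw [pvNames_cons]; simp only [List.mem_append, List.mem_cons]
                  exact Or.inl (Or.inr (List.mem_map_of_mem hq)))
      have h1 := pvA_inner_keys p.1 p.2 t hu hos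
      rw [List.foldl_cons, ih _ (fun v hv => h1 ▸ h v (by rw [pvNames_cons]; simp [hv]))]
      exact h1

-- A's result is the sorted user list paired with net balances
theorem pvA_items (graph : List (String × List (String × Int))) :
    get_total_per_user graph
      = (get_users_from_graph graph).map (fun u => (u, pvNet u graph)) := by
  show (graph.foldl (fun t p =>
        p.2.foldl (fun t q => (t.modify p.1 0 (· + q.2)).modify q.1 0 (· - q.2)) t)
        ((get_users_from_graph graph).foldl (fun t u => t.insert u 0) PySem.Dict.empty)).items
      = _
  set tA0 := (get_users_from_graph graph).foldl (fun t u => t.insert u 0)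
      (PySem.Dict.empty : PySem.Dict String Int) with htA0
  set tA := graph.foldl (fun t p =>
      p.2.foldl (fun t q => (t.modify p.1 0 (· + q.2)).modify q.1 0 (· - q.2)) t) tA0 with htA
  have hnduRaw := pvUsersList_nodup graph
  have hKA0 : tA0.keys = get_users_from_graph graph := pvInit_keys _ hnduRaw
  have hKA : tA.keys = get_users_from_graph graph := by
    rw [htA, pvA_keys _ _ (fun v hv => hKA0 ▸ (pvUsersList_mem graph v).mpr hv), hKA0]
  have hNodA : tA.keys.Nodup := hKA ▸ hnduRaw
  have hgA : ∀ v, tA.getD v 0 = pvNet v graph := fun v => by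
    rw [htA, pvA_getD, htA0, pvInit_getD _ _ _ (PySem.Dict.getD_empty _ _), zero_add]
  rw [PySem.Dict.items_eq_map_keys tA hNodA 0, hKA]
  exact List.map_congr_left (fun u _ => by rw [hgA])

-- ---- B-side lemmas ----

-- sum of a filtered projection as a sum of guarded terms
theorem pvSum_filter (l : List (String × String × Int)) (p : String × String × Int → Bool) :
    ((l.filter p).map (fun e => e.2.2)).sum
      = (l.map (fun e => if p e then e.2.2 else 0)).sum := by
  induction l with
  | nil => rfl
  | cons e l ih =>
      by_cases h : p e <;> simp [h, ih]

-- pointwise subtraction of two mapped sums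
theorem pvMapSub (l : List (String × String × Int)) (f g : String × String × Int → Int) :
    (l.map f).sum - (l.map g).sum = (l.map (fun e => f e - g e)).sum := by
  induction l with
  | nil => simp
  | cons e l ih => simp only [List.map_cons, List.sum_cons]; omega

-- B's per-user value is pvNet
theorem pvB_val (graph : List (String × List (String × Int))) (u : String) :
    ((((graph.flatMap (fun p => p.2.map (fun q => (p.1, q.1, q.2))))).filter
        (fun e => e.1 == u)).map (fun e => e.2.2)).sum
      - ((((graph.flatMap (fun p => p.2.map (fun q => (p.1, q.1, q.2))))).filter
        (fun e => e.2.1 == u)).map (fun e => e.2.2)).sum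
      = pvNet u graph := by
  rw [pvSum_filter, pvSum_filter, pvMapSub]
  induction graph with
  | nil => simp [pvNet]
  | cons p graph ih =>
      simp only [List.flatMap_cons, List.map_append, List.sum_append, List.map_map,
        pvNet, List.map_cons, List.sum_cons] at *
      have hhead : (p.2.map ((fun e => (if e.1 == u then e.2.2 else 0)
            - (if e.2.1 == u then e.2.2 else 0)) ∘ fun q => (p.1, q.1, q.2))).sum
          = pvContrib u p := by
        unfold pvContrib
        refine congrArg _ (List.map_congr_left (fun q _ => ?_))
        by_cases h1 : p.1 = u <;> by_cases h2 : q.1 = u <;> simp [h1, h2]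
      omega

-- B's user set has the same members as pvNames, without duplicates
theorem pvB_users_mem (graph : List (String × List (String × Int))) (v : String) :
    v ∈ PySem.Set.union (PySem.Set.ofList (graph.map (·.1)))
        (PySem.Set.ofList ((graph.flatMap (fun p => p.2.map (fun q => (p.1, q.1, q.2)))).map
          (fun e => e.2.1)))
      ↔ v ∈ pvNames graph := by
  rw [PySem.Set.mem_union]
  simp only [PySem.Set.mem_ofList, List.mem_map, List.mem_flatMap, pvNames, List.mem_cons]
  constructor
  · rintro (⟨p, hp, rfl⟩ | ⟨e, ⟨p, hp, q, hq, rfl⟩, rfl⟩)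
    · exact ⟨p, hp, Or.inl rfl⟩
    · exact ⟨p, hp, Or.inr ⟨q, hq, rfl⟩⟩
  · rintro ⟨p, hp, rfl | ⟨q, hq, rfl⟩⟩
    · exact Or.inl ⟨p, hp, rfl⟩
    · exact Or.inr ⟨(p.1, q.1, q.2), ⟨p, hp, q, hq, rfl⟩, rfl⟩

-- two nodup lists with the same members sort (by identity) to the same list
theorem pvSorted_eq_of_same_mem (s t : List String) (hs : s.Nodup) (ht : t.Nodup)
    (h : ∀ x, x ∈ s ↔ x ∈ t) :
    PySem.List.sorted s (fun x => x) false = PySem.List.sorted t (fun x => x) false := by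
  have hperm : (PySem.List.sorted t (fun x => x) false).Perm s :=
    (PySem.List.sorted_perm _ _ _).trans
      (((List.perm_ext_iff_of_nodup ht hs).mpr (fun a => (h a).symm)))
  have hnd : (PySem.List.sorted t (fun x => x) false).Nodup :=
    (PySem.List.sorted_perm _ _ _).nodup_iff.mpr ht
  have hle : (PySem.List.sorted t (fun x => x) false).Pairwise (· ≤ ·) :=
    PySem.List.sorted_pairwise _ _
  exact PySem.List.sorted_eq_of_perm_of_pairwise_lt _ _ _ hperm
    ((hle.and hnd).imp (fun h => lt_of_le_of_ne h.1 h.2))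

theorem pvMain (graph : List (String × List (String × Int))) :
    get_total_per_user graph = get_total_per_user_alt graph := by
  rw [pvA_items]
  show _ = (PySem.List.sorted
      (PySem.Set.union (PySem.Set.ofList (graph.map (·.1)))
        (PySem.Set.ofList ((graph.flatMap (fun p => p.2.map (fun q => (p.1, q.1, q.2)))).map
          (fun e => e.2.1)))) (fun x => x) false).map _
  have husers : get_users_from_graph graph
      = PySem.List.sorted
          (PySem.Set.union (PySem.Set.ofList (graph.map (·.1)))
            (PySem.Set.ofList ((graph.flatMap (fun p => p.2.map (fun q => (p.1, q.1, q.2)))).map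
              (fun e => e.2.1)))) (fun x => x) false := by
    unfold get_users_from_graph
    refine pvSorted_eq_of_same_mem _ _
      (pvUsers_nodup graph _ (by simp [PySem.Set.empty]))
      (PySem.Set.nodup_union _ _ (PySem.Set.nodup_ofList _)) (fun x => ?_)
    rw [pvB_users_mem, pvUsers_mem]
    simp [PySem.Set.empty]
  rw [← husers]
  exact List.map_congr_left (fun u _ => by rw [← pvB_val graph u])

-- ===== VERDICT (by name: the statement is the Claim_ definition above) =====
theorem get_total_per_user_spec : Claim_equal_get_total_per_user := by
  intro graph _
  unfold Spec_get_total_per_user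
  exact pvMain graph
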